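-- pv_equiv track=rewrite | github.com/yudai0804/sotsuken | fft.py | my_bit_reverse
-- ===== SOURCE A (Python) =====
-- def my_bit_reverse(x):
--     y = [0] * len(x)
--     msb = 0
--     for i in range(len(x)):
--         for j in range(32):
--             if x[i] & (0x01 << j):
--                 msb = max(msb, j)
--     msb += 1
--     """
--     for i in range(len(x)):
--         for j in range(msb):
--             if x[i] & (0x01 << j):
--                 y[i] |= 1 << (msb - 1 - j)
--     """
--     # """
--     for i in range(len(x)):
--         for j in range(msb):
--             y[i] |= ((x[i] & (0x01 << j)) >> j) << (msb - 1 - j)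
--     # """
--     return y
-- ===== SOURCE B (Python) =====
-- def my_bit_reverse(x):
--     if not x:
--         return []
--     msb = max((v & 0xFFFFFFFF).bit_length() for v in x)
--     if msb == 0:
--         msb = 1
--     mask = (1 << msb) - 1
--     out = []
--     for v in x:
--         s = format(v & mask, '0{}b'.format(msb))[::-1]
--         r = 0
--         for c in s:
--             r = 2 * r + (1 if c == '1' else 0)
--         out.append(r)
--     return out
-- ===== Notes on version B (the rewrite author's own statement) =====
-- stated objective: faster
-- what changed: Replaces A's fixed 32-bit scan per element and per-bit mask/shift/OR reconstruction with bit_length to get the common width and a zero-padded binary-string reversal per element.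
import Mathlib
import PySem

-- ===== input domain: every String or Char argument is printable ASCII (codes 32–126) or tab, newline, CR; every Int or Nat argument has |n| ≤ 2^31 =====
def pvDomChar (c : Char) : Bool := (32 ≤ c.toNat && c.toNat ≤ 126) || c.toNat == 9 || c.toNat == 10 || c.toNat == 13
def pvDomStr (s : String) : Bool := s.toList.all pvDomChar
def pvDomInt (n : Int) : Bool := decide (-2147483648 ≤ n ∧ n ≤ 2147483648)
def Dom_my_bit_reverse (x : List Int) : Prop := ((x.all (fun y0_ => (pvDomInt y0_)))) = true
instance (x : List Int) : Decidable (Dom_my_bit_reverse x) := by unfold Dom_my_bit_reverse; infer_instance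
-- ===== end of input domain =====

-- B replaces A's 32-bit scan and per-bit mask/shift/OR loops by bit_length for the common
-- width and a zero-padded binary-string reversal per element.

-- ===== PORT A =====
def my_bit_reverse (x : List Int) : List Int :=
  let y : List Int := List.replicate x.length 0
  let msb : Nat :=
    ((List.range x.length).foldl (fun (m : Nat) (i : Nat) =>
        (List.range 32).foldl (fun (m : Nat) (j : Nat) =>
          if PySem.Int.band (x.getD i 0) ((1 : Int) <<< j) ≠ 0 then max m j else m) m)
      0) + 1
  (List.range x.length).foldl (fun (y : List Int) (i : Nat) =>
      (List.range msb).foldl (fun (y : List Int) (j : Nat) =>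
        y.set i (PySem.Int.bor (y.getD i 0)
          (((PySem.Int.band (x.getD i 0) ((1 : Int) <<< j)) >>> j) <<< (msb - 1 - j)))) y)
    y

-- ===== PORT B =====
-- hand port of format(n, '0{w}b') for n ≥ 0 (exact): binary digits of n, most significant
-- first, left-padded with '0' to width w; structural recursion with fuel n (n/2 < n)
def pvBinCharsGo (fuel : Nat) (n : Nat) : List Char :=
  match fuel with
  | 0 => [if n = 1 then '1' else '0']
  | fuel + 1 =>
    if n < 2 then [if n = 1 then '1' else '0']
    else pvBinCharsGo fuel (n / 2) ++ [if n % 2 = 1 then '1' else '0']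

def pvBinChars (n : Nat) : List Char := pvBinCharsGo n n

def pvBinPad (w : Nat) (n : Nat) : List Char :=
  List.replicate (w - (pvBinChars n).length) '0' ++ pvBinChars n

def my_bit_reverse_alt (x : List Int) : List Int :=
  if x = [] then []
  else
    let msb0 : Nat :=
      (PySem.List.max? (x.map (fun v => PySem.Int.bitLength (PySem.Int.band v 0xFFFFFFFF)))
        (fun b => b)).getD 0
    let msb := if msb0 = 0 then 1 else msb0
    let mask : Int := ((1 : Int) <<< msb) - 1
    x.map (fun v =>
      let s := (pvBinPad msb (PySem.Int.band v mask).toNat).reverse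
      s.foldl (fun r c => 2 * r + (if c = '1' then (1 : Int) else 0)) 0)

-- ===== PRECONDITION & SPEC =====
def Spec_my_bit_reverse (x : List Int) (out : List Int) : Prop := out = my_bit_reverse_alt x
instance (x : List Int) (out : List Int) : Decidable (Spec_my_bit_reverse x out) := by unfold Spec_my_bit_reverse; infer_instance

-- ===== CLAIM (what is proved, stated in full; the proofs are below) =====
def Claim_equal_my_bit_reverse : Prop := ∀ (x : List Int), Dom_my_bit_reverse x → Spec_my_bit_reverse x (my_bit_reverse x)

-- ===== LEMMAS AND PROOFS =====

-- mathematical midpoint: the reverse of the low w bits of v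
def revInt : Nat → Int → Int
  | 0, _ => 0
  | (w+1), v => PySem.Int.mod v 2 * 2 ^ w + revInt w (v / 2)

def revN : Nat → Nat → Nat
  | 0, _ => 0
  | (w+1), n => n % 2 * 2 ^ w + revN w (n / 2)

def pvParse (cs : List Char) : Int :=
  cs.foldl (fun r c => 2 * r + (if c = '1' then (1 : Int) else 0)) 0

def pvBL (v : Int) : Nat := PySem.Int.bitLength (PySem.Int.band v 0xFFFFFFFF)

def pvT (x : List Int) : Nat := x.foldl (fun m v => max m (pvBL v)) 0

-- ---- integer shift/band basics ----

theorem pv_shiftR (v : Int) (n : Nat) : v >>> n = v / 2 ^ n := by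
  rw [Int.shiftRight_eq_div_pow]; push_cast; ring

theorem pv_shiftL (v : Int) (n : Nat) : v <<< n = v * 2 ^ n := Int.shiftLeft_eq v n

theorem pv_mod2_cases (v : Int) : PySem.Int.mod v 2 = 0 ∨ PySem.Int.mod v 2 = 1 := by
  have h1 := PySem.Int.mod_nonneg v (b := 2) (by norm_num)
  have h2 := PySem.Int.mod_lt v (b := 2) (by norm_num)
  omega

theorem pv_cast_pow (k : Nat) : ((2 : Int) ^ k) = ((2 ^ k : Nat) : Int) := by push_cast; ring

theorem pv_div_succ (v : Int) (j : Nat) : v / 2 ^ (j + 1) = (v / 2) / 2 ^ j := by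
  rw [show (2 : Int) ^ (j+1) = 2 * 2 ^ j by rw [pow_succ]; ring]
  rw [Int.ediv_ediv_eq_ediv_mul (by norm_num : (0:Int) ≤ 2)]

theorem pv_testBit_iff (a j : Nat) : a.testBit j = true ↔ a / 2 ^ j % 2 = 1 := by
  have h := Nat.toNat_testBit a j
  rcases Bool.eq_false_or_eq_true (a.testBit j) with hb | hb <;> rw [hb] at h ⊢ <;> simp_all

-- v & (2^k - 1) = v mod 2^k  (Python semantics, any sign of v)
theorem pv_band_mask (v : Int) (k : Nat) :
    PySem.Int.band v ((2 : Int) ^ k - 1) = PySem.Int.mod v ((2 : Int) ^ k) := by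
  have hone : (0 : Int) < 2 ^ k := by positivity
  have hpow := pv_cast_pow k
  have hm : (0 : Int) ≤ (2 : Int) ^ k - 1 := by omega
  have h1 : ((2 : Int) ^ k - 1).toNat = 2 ^ k - 1 := by omega
  rw [PySem.Int.mod_eq_emod_of_pos hone]
  unfold PySem.Int.band
  by_cases hv : 0 ≤ v
  · rw [if_pos hv, if_pos hm, h1, Nat.and_two_pow_sub_one_eq_mod]
    conv_rhs => rw [show v = ((v.toNat : Nat) : Int) by omega, hpow]
    push_cast
    ring
  · rw [if_neg hv, if_pos hm, h1]
    have hu : (0 : Int) ≤ -v - 1 := by omega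
    set u : Nat := (-v - 1).toNat with hudef
    have huv : v = -(u : Int) - 1 := by omega
    rw [Nat.and_comm, Nat.and_two_pow_sub_one_eq_mod]
    have hq := Nat.div_add_mod u (2 ^ k)
    have hrlt : u % 2 ^ k < 2 ^ k := Nat.mod_lt _ (by positivity)
    have hdecomp : v = (((2 ^ k : Nat) : Int) - 1 - ((u % 2 ^ k : Nat) : Int))
        + ((2 ^ k : Nat) : Int) * (-(((u / 2 ^ k : Nat) : Int)) - 1) := by
      have hcast := congrArg (Nat.cast : Nat → Int) hq
      push_cast at hcast
      rw [huv]
      push_cast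
      linarith [hcast]
    rw [hpow, hdecomp, Int.add_mul_emod_self_left]
    rw [Int.emod_eq_of_lt (by omega) (by omega)]
    omega

-- v & (1 << j) = ((v / 2^j) mod 2) * 2^j  (any sign of v)
theorem pv_band_pow (v : Int) (j : Nat) :
    PySem.Int.band v ((1 : Int) <<< j) = PySem.Int.mod (v / 2 ^ j) 2 * 2 ^ j := by
  rw [pv_shiftL, one_mul]
  rw [PySem.Int.mod_eq_emod_of_pos (by norm_num)]
  have hone : (0 : Int) < 2 ^ j := by positivity
  have hpow := pv_cast_pow j
  have h1 : ((2 : Int) ^ j).toNat = 2 ^ j := by omega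
  unfold PySem.Int.band
  by_cases hv : 0 ≤ v
  · rw [if_pos hv, if_pos (by positivity), h1, Nat.and_two_pow, Nat.toNat_testBit]
    have hvd : v / 2 ^ j = ((v.toNat / 2 ^ j : Nat) : Int) := by
      conv_lhs => rw [show v = ((v.toNat : Nat) : Int) by omega, hpow]
      rw [← Int.natCast_ediv]
    rw [hvd]
    rw [show (((v.toNat / 2 ^ j : Nat) : Int)) % 2 = ((v.toNat / 2 ^ j % 2 : Nat) : Int) by
      push_cast; ring]
    push_cast
    ring
  · rw [if_neg hv, if_pos (by positivity), h1]
    have hu : (0 : Int) ≤ -v - 1 := by omega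
    set u : Nat := (-v - 1).toNat with hudef
    have huv : v = -(u : Int) - 1 := by omega
    rw [Nat.and_comm, Nat.and_two_pow, Nat.toNat_testBit]
    have hq := Nat.div_add_mod u (2 ^ j)
    have hrlt : u % 2 ^ j < 2 ^ j := Nat.mod_lt _ (by positivity)
    have hdecomp : v = (((2 ^ j : Nat) : Int) - 1 - ((u % 2 ^ j : Nat) : Int))
        + ((2 ^ j : Nat) : Int) * (-(((u / 2 ^ j : Nat) : Int)) - 1) := by
      have hcast := congrArg (Nat.cast : Nat → Int) hq
      push_cast at hcast
      rw [huv]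
      push_cast
      linarith [hcast]
    have hdiv : v / 2 ^ j = -(((u / 2 ^ j : Nat) : Int)) - 1 := by
      rw [hpow, hdecomp, Int.add_mul_ediv_left _ _ (by omega : ((2 ^ j : Nat) : Int) ≠ 0)]
      rw [Int.ediv_eq_zero_of_lt (by omega) (by omega)]
      ring
    rw [hdiv]
    rcases Nat.mod_two_eq_zero_or_one (u / 2 ^ j) with h | h
    · have hmod : (-(((u / 2 ^ j : Nat) : Int)) - 1) % 2 = 1 := by omega
      rw [h, hmod]
      simpa using hpow.symm
    · have hmod : (-(((u / 2 ^ j : Nat) : Int)) - 1) % 2 = 0 := by omega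
      rw [h, hmod]
      simp

theorem pv_band_shift (v : Int) (j : Nat) :
    (PySem.Int.band v ((1 : Int) <<< j)) >>> j = PySem.Int.mod (v / 2 ^ j) 2 := by
  rw [pv_band_pow, pv_shiftR]
  exact Int.mul_ediv_cancel _ (by positivity)

-- the truthiness test "x & (1 << j)": nonzero iff the bit is set
theorem pv_band_pow_ne (v : Int) (j : Nat) :
    PySem.Int.band v ((1 : Int) <<< j) ≠ 0 ↔ PySem.Int.mod (v / 2 ^ j) 2 = 1 := by
  rw [pv_band_pow]
  have hp : (0 : Int) < 2 ^ j := by positivity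
  rcases pv_mod2_cases (v / 2 ^ j) with h | h <;> rw [h]
  · simp
  · constructor
    · intro _; rfl
    · intro _
      rw [one_mul]
      positivity

-- (v mod 2^(k+1)) low bit and halving
theorem pv_mod_lowbit (v : Int) (k : Nat) :
    (PySem.Int.mod v ((2 : Int) ^ (k+1))).toNat % 2 = (PySem.Int.mod v 2).toNat := by
  have hpos : (0 : Int) < 2 ^ (k+1) := by positivity
  rw [PySem.Int.mod_eq_emod_of_pos hpos, PySem.Int.mod_eq_emod_of_pos (by norm_num)]
  have hdvd : (2 : Int) ∣ 2 ^ (k+1) := dvd_pow_self 2 (Nat.succ_ne_zero k)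
  have h := Int.emod_emod_of_dvd v hdvd
  have h1 : 0 ≤ v % 2 ^ (k+1) := Int.emod_nonneg v (by positivity)
  have h2 : 0 ≤ v % 2 := Int.emod_nonneg v (by norm_num)
  have h3 : v % 2 < 2 := Int.emod_lt_of_pos v (by norm_num)
  omega

theorem pv_mod_shift (v : Int) (k : Nat) :
    (PySem.Int.mod v ((2 : Int) ^ (k+1))).toNat / 2
      = (PySem.Int.mod (v / 2) ((2 : Int) ^ k)).toNat := by
  have hpos : (0 : Int) < 2 ^ (k+1) := by positivity
  have hpos' : (0 : Int) < 2 ^ k := by positivity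
  rw [PySem.Int.mod_eq_emod_of_pos hpos, PySem.Int.mod_eq_emod_of_pos hpos']
  have h1 : 0 ≤ v % 2 ^ (k+1) := Int.emod_nonneg v (by positivity)
  have h2 : v % 2 ^ (k+1) < 2 ^ (k+1) := Int.emod_lt_of_pos v hpos
  have key : (v % 2 ^ (k+1)) / 2 = (v / 2) % 2 ^ k := by
    have hq := Int.ediv_add_emod v (2 ^ (k+1))
    set q : Int := v / 2 ^ (k+1) with hqdef
    set r : Int := v % 2 ^ (k+1) with hrdef
    have hvr : v = r + 2 * (2 ^ k * q) := by
      rw [show (2 : Int) * (2 ^ k * q) = 2 ^ (k+1) * q by rw [pow_succ]; ring]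
      omega
    have hv2 : v / 2 = r / 2 + 2 ^ k * q := by
      conv_lhs => rw [hvr]
      rw [Int.add_mul_ediv_left _ _ (by norm_num : (2:Int) ≠ 0)]
    rw [hv2, Int.add_mul_emod_self_left]
    rw [Int.emod_eq_of_lt (by omega) (by rw [pow_succ] at h2; omega)]
  have h4 : 0 ≤ (v / 2) % 2 ^ k := Int.emod_nonneg _ (by positivity)
  omega

-- ---- A's per-element reversal fold equals revInt ----

theorem pv_or_add (k b0 w : Nat) (hb : b0 ≤ 1) :
    (k * 2 ^ (w+1)) ||| (b0 * 2 ^ w) = k * 2 ^ (w+1) + b0 * 2 ^ w := by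
  have hp : 0 < 2 ^ w := Nat.two_pow_pos w
  have hlt : b0 * 2 ^ w < 2 ^ (w+1) := by
    rw [pow_succ]
    nlinarith
  calc k * 2 ^ (w+1) ||| b0 * 2 ^ w
      = 2 ^ (w+1) * k ||| b0 * 2 ^ w := by rw [Nat.mul_comm]
    _ = 2 ^ (w+1) * k + b0 * 2 ^ w := (Nat.two_pow_add_eq_or_of_lt hlt k).symm
    _ = k * 2 ^ (w+1) + b0 * 2 ^ w := by ring

theorem pvA_gen (w : Nat) : ∀ (v : Int) (k : Nat),
    (List.range w).foldl
      (fun (a : Int) (j : Nat) =>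
        PySem.Int.bor a ((PySem.Int.mod (v / 2 ^ j) 2) <<< (w - 1 - j)))
      ((k * 2 ^ w : Nat) : Int)
    = ((k * 2 ^ w : Nat) : Int) + revInt w v := by
  induction w with
  | zero => intro v k; simp [revInt]
  | succ w ih =>
    intro v k
    rw [List.range_succ_eq_map]
    simp only [List.foldl_cons, List.foldl_map, Nat.succ_eq_add_one]
    have hb := pv_mod2_cases v
    set b0 : Nat := (PySem.Int.mod v 2).toNat with hb0
    have hcast : PySem.Int.mod v 2 = (b0 : Int) := by omega
    have hfirst : PySem.Int.bor ((k * 2 ^ (w+1) : Nat) : Int)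
        ((PySem.Int.mod (v / 2 ^ (0:Nat)) 2) <<< (w + 1 - 1 - 0))
        = (((2 * k + b0) * 2 ^ w : Nat) : Int) := by
      rw [show v / 2 ^ (0:Nat) = v by simp, hcast, pv_shiftL]
      rw [show w + 1 - 1 - 0 = w from rfl]
      rw [show ((b0 : Int) * 2 ^ w) = ((b0 * 2 ^ w : Nat) : Int) by push_cast; ring]
      rw [PySem.Int.bor_natCast]
      rw [pv_or_add k b0 w (by omega)]
      congr 1
      ring
    rw [hfirst]
    have hc2 := PySem.List.foldl_congr_mem (List.range w)
      (fun (a : Int) (j : Nat) =>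
        PySem.Int.bor a ((PySem.Int.mod (v / 2 ^ (j+1)) 2) <<< (w + 1 - 1 - (j+1))))
      (fun (a : Int) (j : Nat) =>
        PySem.Int.bor a ((PySem.Int.mod ((v / 2) / 2 ^ j) 2) <<< (w - 1 - j)))
      (((2 * k + b0) * 2 ^ w : Nat) : Int)
      (fun a j _ => by
        show PySem.Int.bor a ((PySem.Int.mod (v / 2 ^ (j+1)) 2) <<< (w + 1 - 1 - (j+1)))
          = PySem.Int.bor a ((PySem.Int.mod ((v / 2) / 2 ^ j) 2) <<< (w - 1 - j))
        rw [pv_div_succ, show w + 1 - 1 - (j+1) = w - 1 - j by omega])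
    rw [hc2, ih (v / 2) (2 * k + b0)]
    rw [show revInt (w+1) v = PySem.Int.mod v 2 * 2 ^ w + revInt w (v / 2) from rfl, hcast]
    push_cast
    ring

theorem pvA_elt (w : Nat) (v : Int) :
    (List.range w).foldl
      (fun (a : Int) (j : Nat) => PySem.Int.bor a
        (((PySem.Int.band v ((1 : Int) <<< j)) >>> j) <<< (w - 1 - j))) 0
    = revInt w v := by
  have hc := PySem.List.foldl_congr_mem (List.range w)
    (fun (a : Int) (j : Nat) => PySem.Int.bor a
      (((PySem.Int.band v ((1 : Int) <<< j)) >>> j) <<< (w - 1 - j)))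
    (fun (a : Int) (j : Nat) => PySem.Int.bor a ((PySem.Int.mod (v / 2 ^ j) 2) <<< (w - 1 - j)))
    0
    (fun a j _ => by
      show PySem.Int.bor a (((PySem.Int.band v ((1 : Int) <<< j)) >>> j) <<< (w - 1 - j))
        = PySem.Int.bor a ((PySem.Int.mod (v / 2 ^ j) 2) <<< (w - 1 - j))
      rw [pv_band_shift])
  rw [hc]
  simpa using pvA_gen w v 0

-- ---- B's binary-string reversal equals revN ----

theorem pvBinCharsGo_congr (f1 : Nat) : ∀ (f2 n : Nat), n ≤ f1 → n ≤ f2 →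
    pvBinCharsGo f1 n = pvBinCharsGo f2 n := by
  induction f1 with
  | zero =>
    intro f2 n h1 _
    have : n = 0 := by omega
    subst this
    cases f2 <;> simp [pvBinCharsGo]
  | succ f1 ih =>
    intro f2 n h1 h2
    by_cases hn : n < 2
    · cases f2 with
      | zero =>
        have : n = 0 := by omega
        subst this
        simp [pvBinCharsGo]
      | succ f2 => simp [pvBinCharsGo, hn]
    · cases f2 with
      | zero => omega
      | succ f2 =>
        simp only [pvBinCharsGo, if_neg hn]
        rw [ih f2 (n / 2) (by omega) (by omega)]

theorem pvBinChars_eq (n : Nat) :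
    pvBinChars n = if n < 2 then [if n = 1 then '1' else '0']
      else pvBinChars (n / 2) ++ [if n % 2 = 1 then '1' else '0'] := by
  by_cases hn : n < 2
  · rw [if_pos hn]
    interval_cases n <;> simp [pvBinChars, pvBinCharsGo]
  · rw [if_neg hn]
    unfold pvBinChars
    obtain ⟨m, rfl⟩ : ∃ m, n = m + 1 := ⟨n - 1, by omega⟩
    simp only [pvBinCharsGo, if_neg hn]
    rw [pvBinCharsGo_congr m ((m+1)/2) ((m+1)/2) (by omega) (by omega)]

theorem pvBinChars_zero : pvBinChars 0 = ['0'] := by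
  rw [pvBinChars_eq]
  norm_num

theorem pvBinChars_one : pvBinChars 1 = ['1'] := by
  rw [pvBinChars_eq]
  norm_num

theorem pv_binChars_len (w : Nat) : ∀ n, n < 2 ^ (w+1) → (pvBinChars n).length ≤ w + 1 := by
  induction w with
  | zero =>
    intro n hn
    have h2 : n < 2 := by omega
    rw [pvBinChars_eq, if_pos h2]
    simp
  | succ w ih =>
    intro n hn
    rw [pvBinChars_eq]
    split
    · simp
    · rename_i h
      have hlt : n / 2 < 2 ^ (w+1) := by
        rw [pow_succ] at hn
        omega
      have := ih (n / 2) hlt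
      rw [List.length_append]
      simp only [List.length_cons, List.length_nil]
      omega

theorem pv_pad_len (w : Nat) (n : Nat) (hw : 1 ≤ w) (hn : n < 2 ^ w) :
    (pvBinPad w n).length = w := by
  obtain ⟨w', rfl⟩ : ∃ w', w = w' + 1 := ⟨w - 1, by omega⟩
  have := pv_binChars_len w' n hn
  rw [pvBinPad, List.length_append, List.length_replicate]
  omega

theorem pv_pad_step (w : Nat) (n : Nat) (hw : 1 ≤ w) (hn : n < 2 ^ (w+1)) :
    pvBinPad (w+1) n = pvBinPad w (n / 2) ++ [if n % 2 = 1 then '1' else '0'] := by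
  by_cases h2 : n < 2
  · have hn2 : n / 2 = 0 := by omega
    rw [pvBinPad, pvBinPad, hn2, pvBinChars_zero]
    rw [show pvBinChars n = [if n = 1 then '1' else '0'] by rw [pvBinChars_eq, if_pos h2]]
    have hch : (if n = 1 then '1' else '0') = (if n % 2 = 1 then '1' else '0') := by
      interval_cases n <;> simp
    rw [hch]
    simp only [List.length_cons, List.length_nil]
    obtain ⟨w', rfl⟩ : ∃ w', w = w' + 1 := ⟨w - 1, by omega⟩
    rw [show w' + 1 + 1 - (0 + 1) = w' + 1 by omega, show w' + 1 - (0 + 1) = w' by omega]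
    rw [show List.replicate (w' + 1) '0' = List.replicate w' '0' ++ ['0'] by
      simp [List.replicate_succ']]
    try simp [List.append_assoc]
  · rw [pvBinPad, pvBinPad]
    rw [show pvBinChars n = pvBinChars (n / 2) ++ [if n % 2 = 1 then '1' else '0'] by
      rw [pvBinChars_eq, if_neg h2]]
    have hlen : (pvBinChars (n / 2)).length ≤ w := by
      obtain ⟨w', rfl⟩ : ∃ w', w = w' + 1 := ⟨w - 1, by omega⟩
      apply pv_binChars_len
      rw [pow_succ] at hn
      omega
    rw [List.length_append]
    simp only [List.length_cons, List.length_nil]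
    rw [show w + 1 - ((pvBinChars (n/2)).length + 1) = w - (pvBinChars (n/2)).length by omega]
    try simp [List.append_assoc]

theorem pv_parse_acc (cs : List Char) : ∀ (a : Int),
    cs.foldl (fun r c => 2 * r + (if c = '1' then (1 : Int) else 0)) a
    = a * 2 ^ cs.length + pvParse cs := by
  induction cs with
  | nil => intro a; simp [pvParse]
  | cons c t ih =>
    intro a
    simp only [List.foldl_cons, List.length_cons]
    rw [ih (2 * a + _)]
    have hp : pvParse (c :: t)
        = (2 * 0 + (if c = '1' then (1 : Int) else 0)) * 2 ^ t.length + pvParse t := by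
      rw [pvParse, List.foldl_cons]
      exact ih _
    rw [hp]
    ring

theorem pv_parseB (w : Nat) : ∀ n, n < 2 ^ w →
    pvParse ((pvBinPad w n).reverse) = (revN w n : Int) := by
  induction w with
  | zero =>
    intro n hn
    have : n = 0 := by omega
    subst this
    rw [show pvBinPad 0 0 = ['0'] by rw [pvBinPad, pvBinChars_zero]; simp]
    simp [pvParse, revN]
  | succ w ih =>
    intro n hn
    by_cases hw : 1 ≤ w
    · rw [pv_pad_step w n hw hn, List.reverse_append]
      simp only [List.reverse_cons, List.reverse_nil, List.nil_append, List.cons_append]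
      rw [pvParse, List.foldl_cons, pv_parse_acc]
      have hlen : ((pvBinPad w (n / 2)).reverse).length = w := by
        rw [List.length_reverse]
        apply pv_pad_len w _ hw
        rw [pow_succ] at hn
        omega
      rw [hlen]
      have hrec : pvParse ((pvBinPad w (n / 2)).reverse) = (revN w (n / 2) : Int) := by
        apply ih
        rw [pow_succ] at hn
        omega
      rw [hrec]
      rw [show revN (w+1) n = n % 2 * 2 ^ w + revN w (n / 2) from rfl]
      have hd : (2 * 0 + (if (if n % 2 = 1 then '1' else '0') = '1' then (1:Int) else 0))
          = ((n % 2 : Nat) : Int) := by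
        rcases Nat.mod_two_eq_zero_or_one n with h | h <;> simp [h]
      rw [hd]
      push_cast
      ring
    · have hw0 : w = 0 := by omega
      subst hw0
      have : n < 2 := by omega
      interval_cases n
      · rw [show pvBinPad 1 0 = ['0'] by rw [pvBinPad, pvBinChars_zero]; simp]
        simp [pvParse, revN]
      · rw [show pvBinPad 1 1 = ['1'] by rw [pvBinPad, pvBinChars_one]; simp]
        simp [pvParse, revN]

-- ---- bridge: revN of the masked value equals revInt ----

theorem pv_bridge (w : Nat) : ∀ (v : Int),
    (revN w ((PySem.Int.mod v ((2:Int) ^ w)).toNat) : Int) = revInt w v := by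
  induction w with
  | zero => intro v; simp [revN, revInt]
  | succ w ih =>
    intro v
    rw [show revN (w+1) ((PySem.Int.mod v ((2:Int) ^ (w+1))).toNat)
        = ((PySem.Int.mod v ((2:Int) ^ (w+1))).toNat) % 2 * 2 ^ w
          + revN w (((PySem.Int.mod v ((2:Int) ^ (w+1))).toNat) / 2) from rfl]
    rw [pv_mod_lowbit, pv_mod_shift]
    rw [show revInt (w+1) v = PySem.Int.mod v 2 * 2 ^ w + revInt w (v / 2) from rfl]
    rw [← ih (v / 2)]
    have h2 : 0 ≤ PySem.Int.mod v 2 := PySem.Int.mod_nonneg v (by norm_num)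
    push_cast
    rw [Int.toNat_of_nonneg h2]

-- per-element: revInt w v is exactly what B computes with width w
theorem pv_elt (w : Nat) (v : Int) :
    revInt w v
    = pvParse ((pvBinPad w (PySem.Int.band v (((1 : Int) <<< w) - 1)).toNat).reverse) := by
  have hmask : ((1 : Int) <<< w) - 1 = (2 : Int) ^ w - 1 := by
    rw [pv_shiftL]; ring
  rw [hmask, pv_band_mask]
  have h1 : 0 ≤ PySem.Int.mod v ((2:Int) ^ w) := PySem.Int.mod_nonneg v (by positivity)
  have h2 : PySem.Int.mod v ((2:Int) ^ w) < (2:Int) ^ w := PySem.Int.mod_lt v (by positivity)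
  have hlt : (PySem.Int.mod v ((2:Int) ^ w)).toNat < 2 ^ w := by
    have := pv_cast_pow w
    omega
  rw [pv_parseB w _ hlt, pv_bridge]

-- ---- the common msb ----

theorem pv_bit_iff (j : Nat) : ∀ (k : Nat) (v : Int), j < k →
    (PySem.Int.mod (v / 2 ^ j) 2 = 1 ↔
      ((PySem.Int.mod v ((2:Int) ^ k)).toNat).testBit j = true) := by
  induction j with
  | zero =>
    intro k v hk
    obtain ⟨k', rfl⟩ : ∃ k', k = k' + 1 := ⟨k - 1, by omega⟩
    rw [show v / 2 ^ (0:Nat) = v by simp, pv_testBit_iff]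
    simp only [pow_zero, Nat.div_one]
    have hlow := pv_mod_lowbit v k'
    have hc := pv_mod2_cases v
    omega
  | succ j ih =>
    intro k v hk
    obtain ⟨k', rfl⟩ : ∃ k', k = k' + 1 := ⟨k - 1, by omega⟩
    rw [pv_div_succ, ih k' (v / 2) (by omega)]
    rw [Nat.testBit_add_one, pv_mod_shift]

theorem pv_foldmax_le (g : Nat → Nat) (l : List Nat) : ∀ (m B : Nat), m ≤ B →
    (∀ j ∈ l, g j ≤ B) → l.foldl (fun m j => max m (g j)) m ≤ B := by
  induction l with
  | nil => intro m B hm _; simpa using hm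
  | cons c t ih =>
    intro m B hm hl
    simp only [List.foldl_cons]
    apply ih
    · have := hl c (by simp)
      omega
    · intro j hj
      exact hl j (by simp [hj])

theorem pv_inner32 (m : Nat) (v : Int) :
    (List.range 32).foldl
      (fun (m : Nat) (j : Nat) =>
        if PySem.Int.band v ((1 : Int) <<< j) ≠ 0 then max m j else m) m
    = max m (pvBL v - 1) := by
  have hmask : (0xFFFFFFFF : Int) = (2:Int) ^ (32:Nat) - 1 := by norm_num
  have hBL : pvBL v = PySem.Int.bitLength (PySem.Int.mod v ((2:Int) ^ (32:Nat))) := by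
    rw [pvBL, hmask, pv_band_mask]
  obtain ⟨n32, hcast⟩ : ∃ n : Nat, PySem.Int.mod v ((2:Int) ^ (32:Nat)) = (n : Int) :=
    ⟨(PySem.Int.mod v ((2:Int) ^ (32:Nat))).toNat, by
      have := PySem.Int.mod_nonneg v (b := (2:Int) ^ (32:Nat)) (by positivity)
      omega⟩
  have hlt32 : n32 < 2 ^ 32 := by
    have h2 := PySem.Int.mod_lt v (b := (2:Int) ^ (32:Nat)) (by positivity)
    rw [hcast, pv_cast_pow] at h2
    exact_mod_cast h2
  have hBL2 : pvBL v = PySem.Int.bitLength ((n32 : Nat) : Int) := by rw [hBL, hcast]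
  obtain ⟨B, hBdef⟩ : ∃ B, pvBL v = B := ⟨_, rfl⟩
  have hBn : n32 < 2 ^ B := by
    have h := PySem.Int.lt_two_pow_bitLength ((n32 : Nat) : Int)
    rw [← hBL2, hBdef] at h
    simpa using h
  have hBle : n32 ≠ 0 → 2 ^ (B - 1) ≤ n32 := by
    intro h
    have h' := PySem.Int.two_pow_bitLength_le ((n32 : Nat) : Int) (by exact_mod_cast h)
    rw [← hBL2, hBdef] at h'
    simpa using h'
  have hBpos : n32 ≠ 0 → 1 ≤ B := by
    intro h
    by_contra hB0
    have hB0' : B = 0 := by omega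
    rw [hB0'] at hBn
    omega
  have hB0eq : n32 = 0 → B = 0 := by
    intro h0
    rw [← hBdef, hBL2, h0]
    simpa using PySem.Int.bitLength_zero
  have hB32 : B ≤ 32 := by
    by_cases h0 : n32 = 0
    · have := hB0eq h0
      omega
    · by_contra hgt
      have h1' : 2 ^ 32 ≤ 2 ^ (B - 1) := Nat.pow_le_pow_right (by norm_num) (by omega)
      have := hBle h0
      omega
  have hP : ∀ j : Nat, j < 32 →
      ((PySem.Int.band v ((1 : Int) <<< j) ≠ 0) ↔ n32.testBit j = true) := by
    intro j hj
    rw [pv_band_pow_ne, pv_bit_iff j 32 v hj, hcast]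
    simp
  rw [hBdef]
  have hfun : (fun (m : Nat) (j : Nat) =>
        if PySem.Int.band v ((1 : Int) <<< j) ≠ 0 then max m j else m)
      = (fun (m : Nat) (j : Nat) =>
        max m (if PySem.Int.band v ((1 : Int) <<< j) ≠ 0 then j else 0)) := by
    funext m j
    split <;> omega
  rw [hfun]
  apply Nat.le_antisymm
  · apply pv_foldmax_le (fun j => if PySem.Int.band v ((1 : Int) <<< j) ≠ 0 then j else 0)
    · omega
    · intro j hj
      simp only [List.mem_range] at hj
      split
      · rename_i htrig
        have hbit := (hP j hj).mp htrig
        have hjB : j < B := by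
          by_contra hge
          have hsmall : n32 < 2 ^ j :=
            lt_of_lt_of_le hBn (Nat.pow_le_pow_right (by norm_num) (by omega))
          rw [Nat.testBit_lt_two_pow hsmall] at hbit
          exact Bool.false_ne_true hbit
        omega
      · omega
  · by_cases h0 : n32 = 0
    · have hB0 := hB0eq h0
      have hge := (PySem.List.le_foldl_max_nat (List.range 32)
        (fun j => if PySem.Int.band v ((1 : Int) <<< j) ≠ 0 then j else 0) m).1
      omega
    · have htop : n32.testBit (B - 1) = true := by
        rw [pv_testBit_iff]
        have hble := hBle h0
        have hBp := hBpos h0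
        have hd : n32 / 2 ^ (B - 1) = 1 := by
          apply Nat.div_eq_of_lt_le
          · simpa using hble
          · rw [show (1 + 1) * 2 ^ (B - 1) = 2 ^ (B - 1 + 1) by rw [pow_succ]; ring]
            rw [show B - 1 + 1 = B by omega]
            exact hBn
        rw [hd]
      have htrig : PySem.Int.band v ((1 : Int) <<< (B - 1)) ≠ 0 :=
        (hP (B - 1) (by omega)).mpr htop
      have hle := PySem.List.le_foldl_max_nat (List.range 32)
        (fun j => if PySem.Int.band v ((1 : Int) <<< j) ≠ 0 then j else 0) m
      have h1' := hle.1
      have h2' := hle.2 (B - 1) (by simp only [List.mem_range]; omega)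
      rw [if_pos htrig] at h2'
      omega

-- ---- list plumbing ----

theorem pv_fold_getD {β : Type} (x : List Int) (f : β → Int → β) :
    ∀ (a : β),
      (List.range x.length).foldl (fun acc i => f acc (x.getD i 0)) a = x.foldl f a := by
  induction x with
  | nil => intro a; simp
  | cons c t ih =>
    intro a
    rw [show (c :: t).length = t.length + 1 from rfl, List.range_succ_eq_map]
    simp only [List.foldl_cons, List.foldl_map, List.getD_cons_zero, List.getD_cons_succ]
    exact ih (f a c)

theorem pv_map_getD (x : List Int) :
    (List.range x.length).map (fun i => x.getD i 0) = x := by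
  induction x with
  | nil => simp
  | cons c t ih =>
    rw [show (c :: t).length = t.length + 1 from rfl, List.range_succ_eq_map]
    simp only [List.map_cons, List.map_map, List.getD_cons_zero]
    rw [show ((fun i => (c :: t).getD i 0) ∘ Nat.succ) = fun i => t.getD i 0 from rfl]
    rw [ih]

theorem pv_getD_mid (a b : List Int) (c : Int) : (a ++ c :: b).getD a.length 0 = c := by
  induction a with
  | nil => simp
  | cons h t ih => simpa using ih

theorem pv_set_mid (a b : List Int) (c v : Int) :
    (a ++ c :: b).set a.length v = a ++ v :: b := by
  induction a with
  | nil => simp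
  | cons h t ih => simpa using ih

theorem pv_foldl_set (l : List Nat) (op : Int → Nat → Int) :
    ∀ (a b : List Int) (c : Int),
    l.foldl (fun y j => y.set a.length (op (y.getD a.length 0) j)) (a ++ c :: b)
      = a ++ (l.foldl op c) :: b := by
  induction l with
  | nil => intro a b c; simp
  | cons h t ih =>
    intro a b c
    simp only [List.foldl_cons]
    rw [pv_getD_mid, pv_set_mid]
    exact ih a b (op c h)

theorem pv_fold_build (op2 : Int → Nat → Nat → Int) (msb : Nat) :
    ∀ (n : Nat) (tail : List Int),
    (List.range n).foldl
      (fun (y : List Int) (i : Nat) =>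
        (List.range msb).foldl (fun (y : List Int) (j : Nat) =>
          y.set i (op2 (y.getD i 0) i j)) y)
      (List.replicate n 0 ++ tail)
    = (List.range n).map (fun i => (List.range msb).foldl (fun a j => op2 a i j) 0) ++ tail := by
  intro n
  induction n with
  | zero => intro tail; simp
  | succ m ih =>
    intro tail
    rw [List.range_succ, List.foldl_append]
    have hrep : List.replicate (m+1) (0:Int) ++ tail
        = List.replicate m 0 ++ ((0:Int) :: tail) := by
      rw [List.replicate_succ']
      simp [List.append_assoc]
    rw [hrep, ih ((0:Int) :: tail)]
    simp only [List.foldl_cons, List.foldl_nil]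
    have hset := pv_foldl_set (List.range msb) (fun a j => op2 a m j)
      ((List.range m).map (fun i => (List.range msb).foldl (fun a j => op2 a i j) 0)) tail 0
    simp only [List.length_map, List.length_range] at hset
    rw [hset, List.map_append]
    simp

-- ---- characterizations of the two ports ----

theorem pvA_eq (x : List Int) :
    my_bit_reverse x = x.map (fun v => revInt (max 1 (pvT x)) v) := by
  have hsub : ∀ (a : Nat),
      x.foldl (fun m v => max m (pvBL v - 1)) (a - 1)
        = (x.foldl (fun m v => max m (pvBL v)) a) - 1 := by
    induction x with
    | nil => intro a; simp
    | cons c t ih =>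
      intro a
      simp only [List.foldl_cons]
      rw [show max (a - 1) (pvBL c - 1) = max a (pvBL c) - 1 by omega]
      exact ih (max a (pvBL c))
  have hmsb : ((List.range x.length).foldl (fun (m : Nat) (i : Nat) =>
        (List.range 32).foldl (fun (m : Nat) (j : Nat) =>
          if PySem.Int.band (x.getD i 0) ((1 : Int) <<< j) ≠ 0 then max m j else m) m)
      0) + 1 = max 1 (pvT x) := by
    rw [pv_fold_getD x (fun (m : Nat) (v : Int) =>
      (List.range 32).foldl (fun (m : Nat) (j : Nat) =>
        if PySem.Int.band v ((1 : Int) <<< j) ≠ 0 then max m j else m) m) 0]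
    have hc := PySem.List.foldl_congr_mem x
      (fun (m : Nat) (v : Int) =>
        (List.range 32).foldl (fun (m : Nat) (j : Nat) =>
          if PySem.Int.band v ((1 : Int) <<< j) ≠ 0 then max m j else m) m)
      (fun (m : Nat) (v : Int) => max m (pvBL v - 1))
      0
      (fun m v _ => pv_inner32 m v)
    rw [hc]
    have h0 := hsub 0
    simp only [Nat.zero_sub] at h0
    rw [h0, pvT]
    omega
  simp only [my_bit_reverse]
  rw [hmsb]
  have hbuild := pv_fold_build
    (fun a i j => PySem.Int.bor a
      (((PySem.Int.band (x.getD i 0) ((1 : Int) <<< j)) >>> j) <<< (max 1 (pvT x) - 1 - j)))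
    (max 1 (pvT x)) x.length []
  simp only [List.append_nil] at hbuild
  rw [hbuild]
  rw [show x.map (fun v => revInt (max 1 (pvT x)) v)
      = (List.range x.length).map
          ((fun v => revInt (max 1 (pvT x)) v) ∘ (fun i => x.getD i 0)) from by
    rw [← List.map_map, pv_map_getD]]
  apply List.map_eq_map_iff.mpr
  intro i _
  exact pvA_elt (max 1 (pvT x)) (x.getD i 0)

theorem pvB_eq (x : List Int) :
    my_bit_reverse_alt x
    = x.map (fun v =>
        pvParse ((pvBinPad (max 1 (pvT x))
          (PySem.Int.band v (((1 : Int) <<< (max 1 (pvT x))) - 1)).toNat).reverse)) := by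
  rcases x with _ | ⟨c, t⟩
  · rfl
  · have hne : (c :: t : List Int) ≠ [] := by simp
    have hmax : (PySem.List.max? ((c :: t).map
          (fun v => PySem.Int.bitLength (PySem.Int.band v 0xFFFFFFFF)))
        (fun b => b)).getD 0 = pvT (c :: t) := by
      rw [List.map_cons, PySem.List.max?_id_cons, Option.getD_some, List.foldl_map]
      rw [pvT, List.foldl_cons, Nat.zero_max]
      rfl
    simp only [my_bit_reverse_alt, if_neg hne]
    rw [hmax]
    rw [show (if pvT (c :: t) = 0 then 1 else pvT (c :: t)) = max 1 (pvT (c :: t)) by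
      rcases Nat.eq_zero_or_pos (pvT (c :: t)) with h | h
      · simp [h]
      · rw [if_neg (by omega)]
        omega]
    rfl

-- ===== VERDICT (by name: the statement is the Claim_ definition above) =====
theorem my_bit_reverse_spec : Claim_equal_my_bit_reverse := by
  intro x _
  unfold Spec_my_bit_reverse
  rw [pvA_eq, pvB_eq]
  exact List.map_eq_map_iff.mpr (fun v _ => pv_elt (max 1 (pvT x)) v)
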